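-- pv_equiv track=rewrite | github.com/GiovanniHerrero/MC102 | Exercicios_slides/exercicio55.py | function
-- ===== SOURCE A (Python) =====
-- def function(conjunto1, conjunto2):
--     """
--     Retorna dois conjuntos: um com os dobros dos elementos repetidos
--     e outro com a metade (inteira) dos elementos não repetidos
--
--     Parâmetros:
--         conjunto1 (set): Primeiro conjunto de números inteiros
--         conjunto2 (set): Segundo conjunto de números inteiros
--
--     Retorna:
--         tuple: Dois conjuntos: dobros de elementos repetidos e metades dos elementos não repetidos
--     """
--
--     conjunto_dos_dobros = set()
--     conjunto_das_metades = set()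
--
--     #Encontra os elementos repetidos (na interseção) e adiciona seus dobros ao conjunto dos dobros
--     for element in conjunto1 & conjunto2:
--         conjunto_dos_dobros.add(2*element)
--
--     #Encontra os elementos não repetidos e adiciona sua metade(inteira) ao conjunto das metades
--     for element in conjunto1 ^ conjunto2:
--         conjunto_das_metades.add(element // 2)
--
--     return conjunto_dos_dobros, conjunto_das_metades
-- ===== SOURCE B (Python) =====
-- def function(conjunto1, conjunto2):
--     """Different decomposition: instead of set algebra (& and ^), build one
--     insertion-ordered flag table with two marking passes (1 = seen in
--     conjunto1; on the second pass, 3 = also in conjunto2, 2 = conjunto2 only),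
--     then classify the table's entries by flag value."""
--     flags = {}
--     for x in conjunto1:
--         flags[x] = 1
--     for x in conjunto2:
--         flags[x] = 3 if x in flags else 2
--     conjunto_dos_dobros = set()
--     conjunto_das_metades = set()
--     for x, f in flags.items():
--         if f == 3:
--             conjunto_dos_dobros.add(2 * x)
--         else:
--             conjunto_das_metades.add(x // 2)
--     return conjunto_dos_dobros, conjunto_das_metades
-- ===== Notes on version B (the rewrite author's own statement) =====
-- stated objective: alternative
-- what changed: Replaces A's set-algebra passes (one over the intersection, one over the symmetric difference) with a single insertion-ordered flag dictionary built by two marking passes and then classified by flag value; no set operators or intermediate intersection/difference sets are built.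
import Mathlib
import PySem

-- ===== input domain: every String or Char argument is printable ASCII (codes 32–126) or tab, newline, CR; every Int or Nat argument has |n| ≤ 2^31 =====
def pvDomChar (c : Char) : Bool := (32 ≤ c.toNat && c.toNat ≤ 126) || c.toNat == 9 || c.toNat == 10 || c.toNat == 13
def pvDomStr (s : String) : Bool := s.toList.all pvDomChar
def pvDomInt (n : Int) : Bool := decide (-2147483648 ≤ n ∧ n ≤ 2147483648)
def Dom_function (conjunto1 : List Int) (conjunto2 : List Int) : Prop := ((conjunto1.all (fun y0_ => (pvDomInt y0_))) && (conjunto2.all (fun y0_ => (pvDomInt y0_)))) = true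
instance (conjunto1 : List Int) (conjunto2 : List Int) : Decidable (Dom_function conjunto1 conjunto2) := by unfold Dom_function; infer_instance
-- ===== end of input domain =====

-- B replaces A's set-algebra passes (intersection, symmetric difference) by one
-- insertion-ordered flag dictionary built in two marking passes and then
-- classified by flag value; same cost, different decomposition.

-- ===== PORT A =====
def function (conjunto1 : List Int) (conjunto2 : List Int) : List Int × List Int :=
  let s1 : PySem.Set Int := PySem.Set.ofList conjunto1
  let s2 : PySem.Set Int := PySem.Set.ofList conjunto2
  -- for element in conjunto1 & conjunto2: dobros.add(2*element)
  let conjunto_dos_dobros : PySem.Set Int :=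
    (PySem.Set.inter s1 s2).foldl (fun s e => PySem.Set.add s (2 * e)) PySem.Set.empty
  -- for element in conjunto1 ^ conjunto2: metades.add(element // 2)
  let conjunto_das_metades : PySem.Set Int :=
    (PySem.Set.symmDiff s1 s2).foldl (fun s e => PySem.Set.add s (PySem.Int.floordiv e 2)) PySem.Set.empty
  (conjunto_dos_dobros, conjunto_das_metades)

-- ===== PORT B =====
def function_alt (conjunto1 : List Int) (conjunto2 : List Int) : List Int × List Int :=
  -- flags = {}; for x in conjunto1: flags[x] = 1
  let flags1 : PySem.Dict Int Int :=
    conjunto1.foldl (fun d x => d.insert x 1) PySem.Dict.empty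
  -- for x in conjunto2: flags[x] = 3 if x in flags else 2
  let flags : PySem.Dict Int Int :=
    conjunto2.foldl (fun d x => d.insert x (if d.contains x then 3 else 2)) flags1
  -- for x, f in flags.items(): classify by flag
  flags.items.foldl
    (fun p kv =>
      if kv.2 = 3 then (PySem.Set.add p.1 (2 * kv.1), p.2)
      else (p.1, PySem.Set.add p.2 (PySem.Int.floordiv kv.1 2)))
    (PySem.Set.empty, PySem.Set.empty)

-- ===== PRECONDITION & SPEC =====
-- Both arguments are Python SETS; under the type convention they arrive as lists of
-- DISTINCT elements, and Pre_ only states that representation invariant (on a raw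
-- list with duplicates Python's A would raise TypeError on '&').
def Pre_function (conjunto1 : List Int) (conjunto2 : List Int) : Prop :=
  conjunto1.Nodup ∧ conjunto2.Nodup
instance (conjunto1 : List Int) (conjunto2 : List Int) : Decidable (Pre_function conjunto1 conjunto2) := by unfold Pre_function; infer_instance

def pvWitness_function : List Int × List Int := ([1, 2, 5], [2, 3])

def Spec_function (conjunto1 : List Int) (conjunto2 : List Int) (out : List Int × List Int) : Prop := out = function_alt conjunto1 conjunto2
instance (conjunto1 : List Int) (conjunto2 : List Int) (out : List Int × List Int) : Decidable (Spec_function conjunto1 conjunto2 out) := by unfold Spec_function; infer_instance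

-- ===== CLAIM (what is proved, stated in full; the proofs are below) =====
def Claim_equal_function : Prop := ∀ (conjunto1 : List Int) (conjunto2 : List Int), Dom_function conjunto1 conjunto2 → Pre_function conjunto1 conjunto2 → Spec_function conjunto1 conjunto2 (function conjunto1 conjunto2)

-- ===== LEMMAS AND PROOFS =====

-- pass 1: every key of conjunto1 is mapped to 1
theorem get?_mark_one (l : List Int) (d : PySem.Dict Int Int) (k : Int) :
    (l.foldl (fun d x => d.insert x (1 : Int)) d).get? k
      = if k ∈ l then some 1 else d.get? k := by
  induction l generalizing d with
  | nil => simp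
  | cons x rest ih =>
    simp only [List.foldl_cons, ih, PySem.Dict.get?_insert, List.mem_cons]
    by_cases hkr : k ∈ rest
    · simp [hkr]
    · by_cases hkx : k = x <;> simp [hkr, hkx]

-- pass 2: a key of conjunto2 becomes 3 when it was already present, else 2
theorem get?_mark_two (l : List Int) (hl : l.Nodup) (d : PySem.Dict Int Int) (k : Int) :
    (l.foldl (fun d x => d.insert x (if d.contains x then (3 : Int) else 2)) d).get? k
      = if k ∈ l then some (if d.contains k then 3 else 2) else d.get? k := by
  induction l generalizing d with
  | nil => simp
  | cons x rest ih =>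
    obtain ⟨hx, hrest⟩ := List.nodup_cons.mp hl
    simp only [List.foldl_cons, ih hrest, List.mem_cons]
    by_cases hkr : k ∈ rest
    · have hkx : ¬ k = x := fun h => hx (h ▸ hkr)
      simp [hkr, hkx, PySem.Dict.contains_insert]
    · by_cases hkx : k = x
      · subst hkx; simp [hkr]
      · simp [hkr, hkx, PySem.Dict.get?_insert]

-- a dict with distinct keys is its key list paired with the looked-up values
theorem items_eq_keys_map (d : PySem.Dict Int Int) (h : d.keys.Nodup) :
    d.items = d.keys.map (fun k => (k, d.getD k 0)) := by
  have : d.keys.map (fun k => (k, d.getD k 0))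
      = d.items.map (fun p => (p.1, d.getD p.1 0)) := by
    simp [PySem.Dict.keys, List.map_map, Function.comp]
  have h2 : ∀ p ∈ d.items, (fun p : Int × Int => (p.1, d.getD p.1 0)) p = id p := by
    intro p hp
    have := PySem.Dict.getD_of_mem_items d (k := p.1) (v := p.2) (by simpa using hp) h 0
    simp [this]
  rw [this, List.map_congr_left h2, List.map_id]

-- the classifying loop of B equals two filtered folds over the item list
theorem classify_split (l : List (Int × Int)) (dob met : PySem.Set Int) :
    l.foldl
      (fun p kv =>
        if kv.2 = 3 then (PySem.Set.add p.1 (2 * kv.1), p.2)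
        else (p.1, PySem.Set.add p.2 (PySem.Int.floordiv kv.1 2)))
      (dob, met)
    = ((l.filter (fun kv => decide (kv.2 = 3))).foldl
          (fun s kv => PySem.Set.add s (2 * kv.1)) dob,
       (l.filter (fun kv => !decide (kv.2 = 3))).foldl
          (fun s kv => PySem.Set.add s (PySem.Int.floordiv kv.1 2)) met) := by
  induction l generalizing dob met with
  | nil => rfl
  | cons kv rest ih =>
    simp only [List.foldl_cons, List.filter_cons]
    by_cases h : kv.2 = 3
    · rw [if_pos h, ih]; simp [h]
    · rw [if_neg h, ih]; simp [h]

theorem function_spec : Claim_equal_function := by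
  intro c1 c2 _ hpre
  obtain ⟨h1, h2⟩ := hpre
  unfold Spec_function function function_alt
  dsimp only
  -- names for the two ordered sets
  have hs1 : PySem.Set.ofList c1 = c1 := PySem.Set.ofList_eq_self_of_nodup _ h1
  have hs2 : PySem.Set.ofList c2 = c2 := PySem.Set.ofList_eq_self_of_nodup _ h2
  set d1 : PySem.Dict Int Int := c1.foldl (fun d x => d.insert x 1) PySem.Dict.empty with hd1
  set d2 : PySem.Dict Int Int :=
    c2.foldl (fun d x => d.insert x (if d.contains x then 3 else 2)) d1 with hd2
  -- membership in d1
  have hc1 : ∀ k, d1.contains k = decide (k ∈ c1) := by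
    intro k
    rw [PySem.Dict.contains_eq_isSome_get?, hd1, get?_mark_one]
    by_cases hk : k ∈ c1 <;> simp [hk, PySem.Dict.get?_empty]
  -- keys of d2, in order
  have hkeys : d2.keys = c1 ++ c2.filter (fun y => !PySem.Set.contains c1 y) := by
    rw [hd2, PySem.Dict.keys_foldl_insert (f := fun d x => if d.contains x then 3 else 2),
        hd1, PySem.Dict.keys_foldl_insert (f := fun _ _ => (1 : Int))]
    simp only [PySem.Dict.keys_empty]
    rw [PySem.Set.update_nil_left, hs1, PySem.Set.update_eq_append_filter, hs2]
  have hnodup : d2.keys.Nodup := by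
    rw [hd2, hd1]
    exact PySem.Dict.nodup_keys_foldl_insert _ _ _
      (PySem.Dict.nodup_keys_foldl_insert _ _ _ (by simp [PySem.Dict.keys_empty]))
  -- values of d2
  have hval : ∀ k, d2.getD k 0
      = if k ∈ c2 then (if k ∈ c1 then 3 else 2) else (if k ∈ c1 then 1 else 0) := by
    intro k
    rw [PySem.Dict.getD_eq_get?_getD, hd2, get?_mark_two c2 h2, hc1, hd1, get?_mark_one]
    by_cases hk2 : k ∈ c2 <;> by_cases hk1 : k ∈ c1 <;>
      simp [hk1, hk2, PySem.Dict.get?_empty]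
  -- rewrite everything into folds over explicit key lists
  rw [items_eq_keys_map d2 hnodup, classify_split, hkeys, hs1, hs2]
  rw [List.map_append, List.filter_append, List.filter_append]
  -- the two map-blocks, simplified entrywise
  have hmap1 : c1.map (fun k => (k, d2.getD k 0))
      = c1.map (fun k => (k, if k ∈ c2 then (3 : Int) else 1)) := by
    apply List.map_congr_left
    intro k hk; rw [hval]; simp [hk]
  have hmap2 : (c2.filter (fun y => !PySem.Set.contains c1 y)).map (fun k => (k, d2.getD k 0))
      = (c2.filter (fun y => !PySem.Set.contains c1 y)).map (fun k => (k, (2 : Int))) := by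
    apply List.map_congr_left
    intro k hk
    obtain ⟨hk2, hk1⟩ := List.mem_filter.mp hk
    simp only [Bool.not_eq_eq_eq_not, Bool.not_true, PySem.Set.contains_eq_listContains] at hk1
    rw [hval]
    simp at hk1
    simp [hk1, hk2]
  rw [hmap1, hmap2]
  -- push filters and folds through the maps; only the first components feed the folds
  simp only [List.filter_map, List.foldl_map, List.foldl_append]
  -- identify the four remaining filters
  have e1 : List.filter ((fun kv => decide (kv.2 = 3)) ∘ fun k => ((k : Int), if k ∈ c2 then (3 : Int) else 1)) c1
      = c1.filter (fun x => PySem.Set.contains c2 x) := by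
    apply List.filter_congr
    intro k _
    by_cases hk : k ∈ c2 <;> simp [Function.comp, hk]
  have e2 : List.filter ((fun kv => decide (kv.2 = 3)) ∘ fun k => ((k : Int), (2 : Int)))
      (c2.filter (fun y => !PySem.Set.contains c1 y)) = [] := by
    simp [Function.comp]
  have e3 : List.filter ((fun kv => !decide (kv.2 = 3)) ∘ fun k => ((k : Int), if k ∈ c2 then (3 : Int) else 1)) c1
      = c1.filter (fun x => !PySem.Set.contains c2 x) := by
    apply List.filter_congr
    intro k _
    by_cases hk : k ∈ c2 <;> simp [Function.comp, hk]
  have e4 : List.filter ((fun kv => !decide (kv.2 = 3)) ∘ fun k => ((k : Int), (2 : Int)))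
      (c2.filter (fun y => !PySem.Set.contains c1 y))
      = c2.filter (fun y => !PySem.Set.contains c1 y) := by
    simp [Function.comp]
  rw [e1, e2, e3, e4]
  -- A's intersection and symmetric difference are exactly those filters
  rw [show PySem.Set.inter c1 c2 = c1.filter (fun x => PySem.Set.contains c2 x) from rfl,
      show PySem.Set.symmDiff c1 c2
        = c1.filter (fun x => !PySem.Set.contains c2 x) ++ c2.filter (fun x => !PySem.Set.contains c1 x) from rfl,
      List.foldl_append]
  simp only [List.foldl_nil]
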